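-- pv_equiv track=rewrite | github.com/chainstack/quorum-toolbox | quorumtoolbox/utils/bash_utils.py | make_quorum_node_launch_params
-- ===== SOURCE A (Python) =====
-- def make_quorum_node_launch_params(list_of_kv):
--     launch_params = {}
--
--     for kv in list_of_kv:
--         for key, value in kv.items():
--             if key not in launch_params:
--                 launch_params[key] = value
--             else:
--                 launch_params[key] = handle_duplicate_launch_params(key, launch_params[key], value)
--
--     return launch_params
--
-- def handle_duplicate_launch_params(key, value1, value2):
--     # e.g. --rpcapi raft and --rpcapi admin,db,eth will be concatenated to --rpcapi raft,admin,db,eth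
--     if key == 'rpcapi':
--         return ','.join([value1, value2.replace('--rpcapi', '').replace(' ', '')])
--
--     raise Exception('Unknown duplicate parameter {0}'.format(key))
-- ===== SOURCE B (Python) =====
-- def make_quorum_node_launch_params(list_of_kv):
--     # Pass 1: group every value by key, preserving first-seen key order and value order.
--     groups = {}
--     for kv in list_of_kv:
--         for key, value in kv.items():
--             groups.setdefault(key, []).append(value)
--     # Pass 2: reduce each group left-to-right with the duplicate handler.
--     result = {}
--     for key, values in groups.items():
--         merged = values[0]
--         for extra in values[1:]:
--             merged = handle_duplicate_launch_params(key, merged, extra)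
--         result[key] = merged
--     return result
--
--
-- def handle_duplicate_launch_params(key, value1, value2):
--     if key == 'rpcapi':
--         return ','.join([value1, value2.replace('--rpcapi', '').replace(' ', '')])
--     raise Exception('Unknown duplicate parameter {0}'.format(key))
-- ===== Notes on version B (the rewrite author's own statement) =====
-- stated objective: alternative
-- what changed: Replaces A's single incremental merge-as-you-go dict with a two-pass decomposition: first group all values per key in first-seen order, then reduce each group left-to-right with the duplicate handler.
import Mathlib
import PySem

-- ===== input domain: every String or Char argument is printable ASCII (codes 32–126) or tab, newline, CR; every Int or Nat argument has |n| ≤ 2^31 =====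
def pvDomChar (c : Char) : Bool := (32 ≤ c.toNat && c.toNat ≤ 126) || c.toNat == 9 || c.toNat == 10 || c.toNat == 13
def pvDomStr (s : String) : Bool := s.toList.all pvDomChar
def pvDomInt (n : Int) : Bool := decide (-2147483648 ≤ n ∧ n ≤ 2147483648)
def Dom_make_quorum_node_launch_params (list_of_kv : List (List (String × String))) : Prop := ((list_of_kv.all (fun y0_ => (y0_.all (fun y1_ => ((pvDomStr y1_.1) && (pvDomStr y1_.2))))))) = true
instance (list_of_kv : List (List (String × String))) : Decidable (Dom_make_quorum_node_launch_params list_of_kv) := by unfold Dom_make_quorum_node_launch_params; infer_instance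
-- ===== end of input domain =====

-- B re-decomposes A's incremental merge into a grouping pass followed by a per-key
-- left-to-right reduction pass; same cost, different structure ("alternative").

-- ===== PORT A =====
-- handle_duplicate_launch_params: in the 'raise Exception(...)' branch the Python raises;
-- Pre_ excludes those inputs, the port returns value1 there.
def handle_duplicate_launch_params (key value1 value2 : String) : String :=
  if key == "rpcapi" then
    PySem.Str.join "," [value1, PySem.Str.replace (PySem.Str.replace value2 "--rpcapi" "") " " ""]
  else
    value1

-- each inner Python argument is a dict; its assoc-list representation is read through
-- PySem.Dict.ofList (duplicate keys collapse exactly as Python dict construction does),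
-- and 'for key, value in kv.items()' iterates its items.
def make_quorum_node_launch_params (list_of_kv : List (List (String × String))) : List (String × String) :=
  (list_of_kv.foldl
    (fun lp kv =>
      (PySem.Dict.ofList kv).items.foldl
        (fun lp p =>
          if lp.contains p.1 then
            lp.insert p.1 (handle_duplicate_launch_params p.1 (lp.getD p.1 "") p.2)
          else
            lp.insert p.1 p.2)
        lp)
    PySem.Dict.empty).items

-- ===== PORT B =====
def handle_duplicate_launch_params_alt (key value1 value2 : String) : String :=
  if key == "rpcapi" then
    PySem.Str.join "," [value1, PySem.Str.replace (PySem.Str.replace value2 "--rpcapi" "") " " ""]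
  else
    value1  -- Python raises here; unreachable inside Pre_

-- merged = values[0]; for extra in values[1:]: merged = handle(...)
-- groups are never empty, so the [] case is unreachable; it returns "".
def pvReduceGroup (key : String) : List String → String
  | [] => ""
  | v0 :: rest => rest.foldl (fun m extra => handle_duplicate_launch_params_alt key m extra) v0

def make_quorum_node_launch_params_alt (list_of_kv : List (List (String × String))) : List (String × String) :=
  -- pass 1: groups.setdefault(key, []).append(value)  ≡  modify key [] (· ++ [value])
  let groups : PySem.Dict String (List String) :=
    list_of_kv.foldl
      (fun g kv =>
        (PySem.Dict.ofList kv).items.foldl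
          (fun g p => g.modify p.1 [] (· ++ [p.2])) g)
      PySem.Dict.empty
  -- pass 2: reduce each group, build the result dict
  (groups.items.foldl
    (fun r pr => r.insert pr.1 (pvReduceGroup pr.1 pr.2))
    PySem.Dict.empty).items

-- ===== PRECONDITION & SPEC =====
-- all keys of the input, dicts collapsed the way Python dict construction collapses them
def pvAllKeys (list_of_kv : List (List (String × String))) : List String :=
  list_of_kv.flatMap (fun kv => (PySem.Dict.ofList kv).keys)

-- Pre_ excludes exactly the inputs on which A raises ('Unknown duplicate parameter'):
-- some key other than "rpcapi" occurring in more than one of the input dicts.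
def Pre_make_quorum_node_launch_params (list_of_kv : List (List (String × String))) : Prop :=
  ∀ k ∈ pvAllKeys list_of_kv, k ≠ "rpcapi" → (pvAllKeys list_of_kv).count k ≤ 1

instance (list_of_kv : List (List (String × String))) : Decidable (Pre_make_quorum_node_launch_params list_of_kv) := by
  unfold Pre_make_quorum_node_launch_params; infer_instance

def pvWitness_make_quorum_node_launch_params : (List (List (String × String))) :=
  [[("rpcapi", "raft"), ("port", "21000")], [("rpcapi", "--rpcapi admin, db")]]

def Spec_make_quorum_node_launch_params (list_of_kv : List (List (String × String))) (out : List (String × String)) : Prop := out = make_quorum_node_launch_params_alt list_of_kv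
instance (list_of_kv : List (List (String × String))) (out : List (String × String)) : Decidable (Spec_make_quorum_node_launch_params list_of_kv out) := by unfold Spec_make_quorum_node_launch_params; infer_instance

-- ===== CLAIM (what is proved, stated in full; the proofs are below) =====
def Claim_equal_make_quorum_node_launch_params : Prop := ∀ (list_of_kv : List (List (String × String))), Dom_make_quorum_node_launch_params list_of_kv → Pre_make_quorum_node_launch_params list_of_kv → Spec_make_quorum_node_launch_params list_of_kv (make_quorum_node_launch_params list_of_kv)

-- ===== LEMMAS AND PROOFS =====

-- the fused form of A's loop body (one insert with an if-expression value)
def pvStepA (lp : PySem.Dict String String) (p : String × String) : PySem.Dict String String :=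
  lp.insert p.1 (if lp.contains p.1 then handle_duplicate_launch_params p.1 (lp.getD p.1 "") p.2 else p.2)

-- mergeOpt tracks A's running value for one key
def pvMergeOpt (k : String) : Option String → List String → Option String
  | acc, [] => acc
  | none, v :: vs => pvMergeOpt k (some v) vs
  | some m, v :: vs => pvMergeOpt k (some (handle_duplicate_launch_params k m v)) vs

lemma pvMergeOpt_some (k m : String) (vs : List String) :
    pvMergeOpt k (some m) vs = some (vs.foldl (fun a v => handle_duplicate_launch_params k a v) m) := by
  induction vs generalizing m with
  | nil => rfl
  | cons v vs ih => simp [pvMergeOpt, ih]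

lemma pvStepA_eq (lp : PySem.Dict String String) (p : String × String) :
    (if lp.contains p.1 then
       lp.insert p.1 (handle_duplicate_launch_params p.1 (lp.getD p.1 "") p.2)
     else lp.insert p.1 p.2) = pvStepA lp p := by
  unfold pvStepA; by_cases h : lp.contains p.1 = true <;> simp [h]

lemma pvFoldA_get? (l : List (String × String)) (d : PySem.Dict String String) (k : String) :
    (l.foldl pvStepA d).get? k =
      pvMergeOpt k (d.get? k) ((l.filter (fun p => p.1 == k)).map (·.2)) := by
  induction l generalizing d with
  | nil => rfl
  | cons p l ih =>
    simp only [List.foldl_cons, ih]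
    by_cases hk : p.1 = k
    · subst hk
      simp only [List.filter_cons, beq_self_eq_true, if_pos, List.map_cons]
      cases hg : d.get? p.1 with
      | none =>
        have hc : d.contains p.1 = false := by
          rw [PySem.Dict.contains_eq_isSome_get?, hg]; rfl
        simp [pvStepA, hc, PySem.Dict.get?_insert_self, pvMergeOpt]
      | some m =>
        have hc : d.contains p.1 = true := by
          rw [PySem.Dict.contains_eq_isSome_get?, hg]; rfl
        have hd : d.getD p.1 "" = m := PySem.Dict.getD_of_get?_eq_some d "" hg
        simp [pvStepA, hc, hd, PySem.Dict.get?_insert_self, pvMergeOpt]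
    · have : ((pvStepA d p).get? k) = d.get? k := by
        unfold pvStepA
        exact PySem.Dict.get?_insert_of_ne _ _ (fun h => hk h.symm)
      rw [this]
      congr 1
      simp [show (p.1 == k) = false from beq_eq_false_iff_ne.mpr hk]

-- both nested folds collapse to one fold over the flattened item list
lemma pvFoldl_flatMap {α β γ : Type} (l : List α) (f : α → List β) (g : γ → β → γ) (init : γ) :
    (l.flatMap f).foldl g init = l.foldl (fun acc x => (f x).foldl g acc) init := by
  induction l generalizing init with
  | nil => rfl
  | cons x l ih => simp [List.flatMap_cons, List.foldl_append, ih]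

def pvItems (list_of_kv : List (List (String × String))) : List (String × String) :=
  list_of_kv.flatMap (fun kv => (PySem.Dict.ofList kv).items)

lemma pvA_eq_flat (list_of_kv : List (List (String × String))) :
    make_quorum_node_launch_params list_of_kv =
      ((pvItems list_of_kv).foldl pvStepA PySem.Dict.empty).items := by
  unfold make_quorum_node_launch_params pvItems
  rw [pvFoldl_flatMap]
  congr 1
  refine PySem.List.foldl_congr_mem _ _ _ _ (fun lp kv _ => ?_)
  exact PySem.List.foldl_congr_mem _ _ _ _ (fun d p _ => pvStepA_eq d p)

def pvGroups (list_of_kv : List (List (String × String))) : PySem.Dict String (List String) :=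
  (pvItems list_of_kv).foldl (fun g p => g.modify p.1 [] (· ++ [p.2])) PySem.Dict.empty

lemma pvB_eq_flat (list_of_kv : List (List (String × String))) :
    make_quorum_node_launch_params_alt list_of_kv =
      ((pvGroups list_of_kv).items.foldl
        (fun r pr => r.insert pr.1 (pvReduceGroup pr.1 pr.2)) PySem.Dict.empty).items := by
  unfold make_quorum_node_launch_params_alt pvGroups pvItems
  rw [pvFoldl_flatMap]

lemma pvHandle_eq : handle_duplicate_launch_params_alt = handle_duplicate_launch_params := rfl

lemma pvMain (list_of_kv : List (List (String × String))) :
    make_quorum_node_launch_params list_of_kv = make_quorum_node_launch_params_alt list_of_kv := by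
  rw [pvA_eq_flat, pvB_eq_flat]
  set its := pvItems list_of_kv with hits
  have hGd : pvGroups list_of_kv =
      its.foldl (fun g p => g.modify p.1 [] (· ++ [p.2])) PySem.Dict.empty := rfl
  set G := pvGroups list_of_kv with hG
  set A := its.foldl pvStepA PySem.Dict.empty with hA
  -- keys of both intermediate dicts coincide and are nodup
  have hAkeys : A.keys = PySem.Set.ofList (its.map Prod.fst) := by
    rw [hA]
    have := PySem.Dict.keys_foldl_insert_key (ν := String) its Prod.fst
      (fun d p => if d.contains p.1 then handle_duplicate_launch_params p.1 (d.getD p.1 "") p.2 else p.2)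
      PySem.Dict.empty
    simpa [pvStepA] using this
  have hGkeys : G.keys = PySem.Set.ofList (its.map Prod.fst) := by
    rw [hGd]
    have := PySem.Dict.keys_foldl_modify_key its Prod.fst ([] : List String)
      (fun _ p v => v ++ [p.2]) PySem.Dict.empty
    simpa using this
  have hAnd : A.keys.Nodup := by
    rw [hA]
    have := PySem.Dict.nodup_keys_foldl_insert_key (ν := String) its Prod.fst
      (fun d p => if d.contains p.1 then handle_duplicate_launch_params p.1 (d.getD p.1 "") p.2 else p.2)
      PySem.Dict.empty PySem.Dict.nodup_keys_empty
    simpa [pvStepA] using this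
  have hGnd : G.keys.Nodup := by
    rw [hGd]
    exact PySem.Dict.nodup_keys_foldl_modify_key its Prod.fst ([] : List String)
      (fun _ p v => v ++ [p.2]) PySem.Dict.empty PySem.Dict.nodup_keys_empty
  -- groups' contents
  have hGget : ∀ k, G.getD k [] = (its.filter (fun p => p.1 == k)).map (·.2) := by
    intro k
    rw [hGd]
    simpa using PySem.Dict.getD_foldl_modify_append its PySem.Dict.empty k
  -- pass 2 of B appends fresh keys
  have hfresh : (G.items.foldl (fun r pr => r.insert pr.1 (pvReduceGroup pr.1 pr.2))
      PySem.Dict.empty).items = G.items.map (fun pr => (pr.1, pvReduceGroup pr.1 pr.2)) := by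
    have := PySem.Dict.items_foldl_insert_fresh G.items Prod.fst
      (fun pr => pvReduceGroup pr.1 pr.2) PySem.Dict.empty
      (fun a _ => by simp [PySem.Dict.contains_empty]) (by exact hGnd)
    simpa using this
  rw [hfresh, PySem.Dict.items_eq_map_keys A hAnd "", PySem.Dict.items_eq_map_keys G hGnd [],
      List.map_map, hAkeys, hGkeys]
  refine List.map_congr_left (fun k hk => ?_)
  have hkmem : k ∈ its.map Prod.fst := (PySem.Set.mem_ofList _ _).mp hk
  -- the group of k is nonempty
  obtain ⟨p, hp, hpk⟩ := List.mem_map.mp hkmem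
  have hne : (its.filter (fun p => p.1 == k)).map (·.2) ≠ [] := by
    simp only [ne_eq, List.map_eq_nil_iff, List.filter_eq_nil_iff, not_forall]
    exact ⟨p, hp, by simp [hpk]⟩
  simp only [Function.comp]
  obtain ⟨v0, vs, hv⟩ := List.exists_cons_of_ne_nil hne
  have hAg : A.getD k "" = vs.foldl (fun a v => handle_duplicate_launch_params k a v) v0 := by
    rw [PySem.Dict.getD_eq_get?_getD, hA, pvFoldA_get?, PySem.Dict.get?_empty, hv]
    simp [pvMergeOpt, pvMergeOpt_some]
  rw [hAg, hGget k, hv]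
  simp [pvReduceGroup, pvHandle_eq]

-- ===== VERDICT (by name: the statement is the Claim_ definition above) =====
theorem make_quorum_node_launch_params_spec : Claim_equal_make_quorum_node_launch_params := by
  intro l _ _
  unfold Spec_make_quorum_node_launch_params
  exact pvMain l
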